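-- pv_equiv track=rewrite | github.com/ppizarror/PyDetex | pydetex/utils.py | apply_tag_between_inside
-- ===== SOURCE A (Python) =====
-- from typing import List, Tuple, Optional, Union
--
-- def find_tex_command_char(
--         s: str,
--         symbols_char: Union[Tuple[str, str], str],
--         ignore_escape: bool = False
-- ) -> Tuple[Tuple[int, int], ...]:
--     """
--     Find symbols command positions. Example:
--
--            00000000001111111111....
--            01234567890123456789....
--     Input: This is a $formula$ and this is not.
--     Output: ((10, 18), ...)
--
--     :param s: String
--     :param symbols_char: Symbols to check
--     :param ignore_escape: Ignores \\char
--     :return: Positions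
--     """
--     if isinstance(symbols_char, str):
--         symbols_char = (symbols_char, symbols_char)
--     assert len(symbols_char) == 2
--     assert len(symbols_char[0]) == 1 and len(symbols_char[1]) == 1
--
--     s = '_' + s
--     r = False  # Inside tag
--     a = 0
--     found = []
--
--     for i in range(1, len(s)):
--         # Open tag
--         if not r and s[i] == symbols_char[0] and (not ignore_escape or ignore_escape and s[i - 1] != '\\'):
--             a = i
--             r = True
--         # Close
--         elif r and s[i] == symbols_char[1] and (not ignore_escape or ignore_escape and s[i - 1] != '\\'):
--             r = False
--             found.append((a - 1, i - 1))
--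
--     return tuple(found)
--
-- def apply_tag_between_inside(
--         s: str,
--         symbols_char: Tuple[str, str],
--         tags: Union[Tuple[str, str, str, str], str],
--         ignore_escape: bool = False
-- ) -> str:
--     """
--     Apply tag between symbols. For example, if symbols are ($, $) and tag is [1,2,3,4]:
--
--     Input: This is a $formula$ and this is not.
--     Output: This is a 1$2formula3$4 and this is not
--
--     :param s: String
--     :param symbols_char: Symbols to check
--     :param tags: Tags to replace
--     :param ignore_escape: Ignores \\char
--     :return: String with tags
--     """
--     assert len(symbols_char) == 2
--     assert len(symbols_char[0]) == 1 and len(symbols_char[1]) == 1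
--     if isinstance(tags, str):
--         if tags == '':
--             return s
--         tags = (tags, tags, tags, tags)
--
--     assert len(tags) == 4
--     a, b, c, d = tags
--     tex_tags = find_tex_command_char(s, symbols_char, ignore_escape)
--
--     if len(tex_tags) == 0:
--         return s
--     new_s = ''
--     k = 0  # Moves through tags
--
--     for i in range(len(s)):
--         if k < len(tex_tags) and i in tex_tags[k]:
--             if i == tex_tags[k][0]:
--                 new_s += a + s[i] + b
--             else:
--                 new_s += c + s[i] + d
--                 k += 1
--         else:
--             new_s += s[i]
--
--     return new_s
-- ===== SOURCE B (Python) =====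
-- from typing import Tuple, Union
--
--
-- def find_tex_command_char(
--         s: str,
--         symbols_char: Union[Tuple[str, str], str],
--         ignore_escape: bool = False
-- ) -> Tuple[Tuple[int, int], ...]:
--     if isinstance(symbols_char, str):
--         symbols_char = (symbols_char, symbols_char)
--     assert len(symbols_char) == 2
--     assert len(symbols_char[0]) == 1 and len(symbols_char[1]) == 1
--
--     s = '_' + s
--     r = False
--     a = 0
--     found = []
--     for i in range(1, len(s)):
--         if not r and s[i] == symbols_char[0] and (not ignore_escape or ignore_escape and s[i - 1] != '\\'):
--             a = i
--             r = True
--         elif r and s[i] == symbols_char[1] and (not ignore_escape or ignore_escape and s[i - 1] != '\\'):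
--             r = False
--             found.append((a - 1, i - 1))
--     return tuple(found)
--
--
-- def apply_tag_between_inside(
--         s: str,
--         symbols_char: Tuple[str, str],
--         tags: Union[Tuple[str, str, str, str], str],
--         ignore_escape: bool = False
-- ) -> str:
--     assert len(symbols_char) == 2
--     assert len(symbols_char[0]) == 1 and len(symbols_char[1]) == 1
--     if isinstance(tags, str):
--         if tags == '':
--             return s
--         tags = (tags, tags, tags, tags)
--     assert len(tags) == 4
--     a, b, c, d = tags
--
--     tex_tags = find_tex_command_char(s, symbols_char, ignore_escape)
--     if len(tex_tags) == 0:
--         return s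
--
--     parts = []
--     prev = 0
--     for o, cl in tex_tags:
--         parts.append(s[prev:o])
--         parts.append(a + s[o:o + 1] + b)
--         parts.append(s[o + 1:cl])
--         parts.append(c + s[cl:cl + 1] + d)
--         prev = cl + 1
--     parts.append(s[prev:])
--     return ''.join(parts)
-- ===== Notes on version B (the rewrite author's own statement) =====
-- stated objective: alternative
-- what changed: A's main loop walks every character index of s, testing it against the current tag pair; B instead iterates over the (open, close) pairs themselves, keeping a cursor and splicing slices of s plus the tagged delimiter characters into a parts list joined at the end.
import Mathlib
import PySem

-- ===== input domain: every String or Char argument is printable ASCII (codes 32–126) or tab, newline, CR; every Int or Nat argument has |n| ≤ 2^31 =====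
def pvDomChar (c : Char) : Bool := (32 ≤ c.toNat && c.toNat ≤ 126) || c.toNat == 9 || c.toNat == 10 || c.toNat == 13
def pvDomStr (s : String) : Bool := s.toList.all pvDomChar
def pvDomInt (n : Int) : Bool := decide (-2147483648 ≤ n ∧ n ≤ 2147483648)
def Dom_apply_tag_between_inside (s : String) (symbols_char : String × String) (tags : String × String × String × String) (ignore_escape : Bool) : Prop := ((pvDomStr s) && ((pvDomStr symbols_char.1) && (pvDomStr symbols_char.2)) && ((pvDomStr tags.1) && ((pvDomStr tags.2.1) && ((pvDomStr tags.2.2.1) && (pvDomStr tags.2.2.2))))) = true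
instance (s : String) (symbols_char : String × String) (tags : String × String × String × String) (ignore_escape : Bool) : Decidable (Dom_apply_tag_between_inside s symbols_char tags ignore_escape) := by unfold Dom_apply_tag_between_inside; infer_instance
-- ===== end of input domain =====

-- B replaces A's per-character-index scan by a splice over the found (open, close)
-- pairs themselves (cursor + parts list): objective 'alternative' (same linear cost).
-- Both ports share find_tex_command_char, which B keeps unchanged.

-- ===== PORT A =====
-- the scanning loop of find_tex_command_char (s is '_' + original, i starts at 1,
-- prev is s[i-1]); single-char symbol strings are compared as one-element char lists
def pvFindAux (sym1 sym2 : List Char) (ig : Bool) (prev : Char) (rest : List Char)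
    (i : Nat) (r : Bool) (a : Nat) (acc : List (Nat × Nat)) : List (Nat × Nat) :=
  match rest with
  | [] => acc
  | ch :: rest' =>
    if !r && ([ch] == sym1) && (!ig || (ig && prev != '\\')) then
      pvFindAux sym1 sym2 ig ch rest' (i+1) true i acc
    else if r && ([ch] == sym2) && (!ig || (ig && prev != '\\')) then
      pvFindAux sym1 sym2 ig ch rest' (i+1) false a (acc ++ [(a-1, i-1)])
    else
      pvFindAux sym1 sym2 ig ch rest' (i+1) r a acc

def find_tex_command_char (s : String) (symbols_char : String × String) (ignore_escape : Bool) : List (Nat × Nat) :=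
  pvFindAux symbols_char.1.toList symbols_char.2.toList ignore_escape '_' s.toList 1 false 0 []

-- A's main loop: for i in range(len(s)) with running k into tex_tags
def pvLoopA (a b c d : List Char) (tex : List (Nat × Nat)) (cs : List Char)
    (i : Nat) (k : Nat) (new_s : List Char) : List Char :=
  match cs with
  | [] => new_s
  | ch :: rest =>
    match tex[k]? with
    | some p =>
      if i == p.1 || i == p.2 then
        if i == p.1 then pvLoopA a b c d tex rest (i+1) k (new_s ++ a ++ [ch] ++ b)
        else pvLoopA a b c d tex rest (i+1) (k+1) (new_s ++ c ++ [ch] ++ d)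
      else pvLoopA a b c d tex rest (i+1) k (new_s ++ [ch])
    | none => pvLoopA a b c d tex rest (i+1) k (new_s ++ [ch])

def apply_tag_between_inside (s : String) (symbols_char : String × String) (tags : String × String × String × String) (ignore_escape : Bool) : String :=
  let a := tags.1.toList
  let b := tags.2.1.toList
  let c := tags.2.2.1.toList
  let d := tags.2.2.2.toList
  let tex := find_tex_command_char s symbols_char ignore_escape
  if tex.length == 0 then s
  else String.ofList (pvLoopA a b c d tex s.toList 0 0 [])

-- ===== PORT B =====
-- B's loop: iterate over the pairs, keep a cursor prev, splice slices of s
def pvSplice (a b c d : List Char) (full : List Char) (tex : List (Nat × Nat))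
    (prev : Nat) (parts : List Char) : List Char :=
  match tex with
  | [] => parts ++ PySem.List.slice full (some (prev : Int)) none
  | (o, cl) :: rest =>
      pvSplice a b c d full rest (cl+1)
        (parts ++ PySem.List.slice full (some (prev : Int)) (some (o : Int))
               ++ a ++ PySem.List.slice full (some (o : Int)) (some ((o : Int) + 1)) ++ b
               ++ PySem.List.slice full (some ((o : Int) + 1)) (some (cl : Int))
               ++ c ++ PySem.List.slice full (some (cl : Int)) (some ((cl : Int) + 1)) ++ d)

def apply_tag_between_inside_alt (s : String) (symbols_char : String × String) (tags : String × String × String × String) (ignore_escape : Bool) : String :=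
  let tex := find_tex_command_char s symbols_char ignore_escape
  if tex.length == 0 then s
  else String.ofList (pvSplice tags.1.toList tags.2.1.toList tags.2.2.1.toList tags.2.2.2.toList s.toList tex 0 [])

-- ===== PRECONDITION & SPEC =====
-- Pre_ excludes only inputs where Python A raises AssertionError: each symbol string
-- must be exactly one character.
def Pre_apply_tag_between_inside (s : String) (symbols_char : String × String) (tags : String × String × String × String) (ignore_escape : Bool) : Prop :=
  symbols_char.1.toList.length = 1 ∧ symbols_char.2.toList.length = 1

instance (s : String) (symbols_char : String × String) (tags : String × String × String × String) (ignore_escape : Bool) : Decidable (Pre_apply_tag_between_inside s symbols_char tags ignore_escape) := by unfold Pre_apply_tag_between_inside; infer_instance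

def pvWitness_apply_tag_between_inside : String × (String × String) × (String × String × String × String) × Bool :=
  ("x $f$ y", ("$", "$"), ("1", "2", "3", "4"), false)

def Spec_apply_tag_between_inside (s : String) (symbols_char : String × String) (tags : String × String × String × String) (ignore_escape : Bool) (out : String) : Prop := out = apply_tag_between_inside_alt s symbols_char tags ignore_escape
instance (s : String) (symbols_char : String × String) (tags : String × String × String × String) (ignore_escape : Bool) (out : String) : Decidable (Spec_apply_tag_between_inside s symbols_char tags ignore_escape out) := by unfold Spec_apply_tag_between_inside; infer_instance

-- ===== CLAIM (what is proved, stated in full; the proofs are below) =====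
def Claim_equal_apply_tag_between_inside : Prop := ∀ (s : String) (symbols_char : String × String) (tags : String × String × String × String) (ignore_escape : Bool), Dom_apply_tag_between_inside s symbols_char tags ignore_escape → Pre_apply_tag_between_inside s symbols_char tags ignore_escape → Spec_apply_tag_between_inside s symbols_char tags ignore_escape (apply_tag_between_inside s symbols_char tags ignore_escape)

-- ===== LEMMAS AND PROOFS =====

-- pairs are ordered, open < close, all inside [j, n)
def pvChain (n : Nat) : Nat → List (Nat × Nat) → Prop
  | _, [] => True
  | j, (o, cl) :: ps => j ≤ o ∧ o < cl ∧ cl < n ∧ pvChain n (cl+1) ps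

theorem pvFindAux_append (sym1 sym2 : List Char) (ig : Bool) :
    ∀ (rest : List Char) (prev : Char) (i : Nat) (r : Bool) (a : Nat) (acc : List (Nat × Nat)),
    pvFindAux sym1 sym2 ig prev rest i r a acc = acc ++ pvFindAux sym1 sym2 ig prev rest i r a [] := by
  intro rest
  induction rest with
  | nil => intro prev i r a acc; simp [pvFindAux]
  | cons ch rest ih =>
    intro prev i r a acc
    simp only [pvFindAux]
    split_ifs with h1 h2
    · exact ih ch (i+1) true i acc
    · rw [ih ch (i+1) false a (acc ++ [(a-1, i-1)]), ih ch (i+1) false a ([] ++ [(a-1, i-1)])]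
      simp
    · exact ih ch (i+1) r a acc

theorem pvChain_mono (n : Nat) : ∀ (ps : List (Nat × Nat)) (j j' : Nat), j' ≤ j →
    pvChain n j ps → pvChain n j' ps := by
  intro ps j j' hle hch
  cases ps with
  | nil => trivial
  | cons p ps =>
    obtain ⟨o, cl⟩ := p
    obtain ⟨h1, h2, h3, h4⟩ := hch
    exact ⟨le_trans hle h1, h2, h3, h4⟩

theorem pvFindAux_chain (sym1 sym2 : List Char) (ig : Bool) (n : Nat) :
    ∀ (rest : List Char) (prev : Char) (i : Nat) (r : Bool) (a : Nat),
    i + rest.length = n + 1 → 1 ≤ i →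
    ((r = false → pvChain n (i-1) (pvFindAux sym1 sym2 ig prev rest i r a [])) ∧
     (r = true → 1 ≤ a ∧ a < i → pvChain n (a-1) (pvFindAux sym1 sym2 ig prev rest i r a []))) := by
  intro rest
  induction rest with
  | nil =>
    intro prev i r a _ _
    constructor <;> intro _ <;> first | (intro _; simp [pvFindAux, pvChain]) | simp [pvFindAux, pvChain]
  | cons ch rest ih =>
    intro prev i r a hlen hi
    have hlen' : (i+1) + rest.length = n + 1 := by simp at hlen; omega
    simp only [pvFindAux]
    split_ifs with h1 h2
    · -- open tag found: r was false
      have hr : r = false := by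
        rcases r with _ | _
        · rfl
        · simp at h1
      constructor
      · intro _
        have := (ih ch (i+1) true i hlen' (by omega)).2 rfl ⟨by omega, by omega⟩
        exact pvChain_mono n _ _ _ (by omega) this
      · intro hrt _; rw [hr] at hrt; exact absurd hrt (by simp)
    · -- close tag found: r was true
      have hr : r = true := by
        rcases r with _ | _
        · simp at h2
        · rfl
      constructor
      · intro hrf; rw [hr] at hrf; exact absurd hrf (by simp)
      · intro _ ⟨ha1, hai⟩
        rw [pvFindAux_append]
        have hF := (ih ch (i+1) false a hlen' (by omega)).1 rfl
        have hii : (i+1) - 1 = (i-1) + 1 := by omega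
        rw [hii] at hF
        refine ⟨le_refl _, by omega, by omega, hF⟩
    · -- no-op step
      constructor
      · intro hrf
        have := (ih ch (i+1) r a hlen' (by omega)).1 hrf
        exact pvChain_mono n _ _ _ (by omega) this
      · intro hrt ⟨ha1, hai⟩
        exact (ih ch (i+1) r a hlen' (by omega)).2 hrt ⟨ha1, by omega⟩

theorem find_chain (s : String) (symbols_char : String × String) (ignore_escape : Bool) :
    pvChain s.toList.length 0 (find_tex_command_char s symbols_char ignore_escape) := by
  have := (pvFindAux_chain symbols_char.1.toList symbols_char.2.toList ignore_escape
    s.toList.length s.toList '_' 1 false 0 (by omega) (by omega)).1 rfl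
  simpa [find_tex_command_char] using this

-- plain-copy stretch of A's loop
theorem pvLoopA_copy (a b c d : List Char) (tex : List (Nat × Nat)) :
    ∀ (seg rest : List Char) (j k : Nat) (parts : List Char),
    (∀ p, tex[k]? = some p → ∀ m, m < seg.length → j + m ≠ p.1 ∧ j + m ≠ p.2) →
    pvLoopA a b c d tex (seg ++ rest) j k parts
      = pvLoopA a b c d tex rest (j + seg.length) k (parts ++ seg) := by
  intro seg
  induction seg with
  | nil => intro rest j k parts _; simp
  | cons ch seg ih =>
    intro rest j k parts hcond
    simp only [List.cons_append, pvLoopA]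
    have hstep : ∀ (parts' : List Char),
        pvLoopA a b c d tex (seg ++ rest) (j+1) k parts'
          = pvLoopA a b c d tex rest (j + 1 + seg.length) k (parts' ++ seg) := by
      intro parts'
      exact ih rest (j+1) k parts' (by
        intro p hp m hm
        have := hcond p hp (m+1) (by simpa using Nat.succ_lt_succ hm)
        constructor <;> omega)
    have hlen : j + 1 + seg.length = j + (ch :: seg).length := by simp; omega
    have hpp : parts ++ [ch] ++ seg = parts ++ ch :: seg := by simp
    cases htex : tex[k]? with
    | none =>
      dsimp only
      rw [hstep, hlen, hpp]
    | some p =>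
      obtain ⟨h1, h2⟩ := hcond p htex 0 (by simp)
      simp only [Nat.add_zero] at h1 h2
      have hcf : (j == p.1 || j == p.2) = false := by simp [h1, h2]
      dsimp only
      rw [hcf]
      simp only [Bool.false_eq_true, if_false]
      rw [hstep, hlen, hpp]

theorem pvLoopA_none (a b c d : List Char) (tex : List (Nat × Nat)) :
    ∀ (cs : List Char) (j k : Nat) (parts : List Char), tex[k]? = none →
    pvLoopA a b c d tex cs j k parts = parts ++ cs := by
  intro cs
  induction cs with
  | nil => intro j k parts _; simp [pvLoopA]
  | cons ch cs ih =>
    intro j k parts h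
    simp only [pvLoopA, h]
    rw [ih (j+1) k (parts ++ [ch]) h]
    simp

theorem pvLoopA_eq_pvSplice (a b c d : List Char) (full : List Char) (tex : List (Nat × Nat)) :
    ∀ (ps : List (Nat × Nat)) (k j : Nat) (parts : List Char),
    tex.drop k = ps → pvChain full.length j ps → j ≤ full.length →
    pvLoopA a b c d tex (full.drop j) j k parts = pvSplice a b c d full ps j parts := by
  intro ps
  induction ps with
  | nil =>
    intro k j parts hdrop _ _
    have hnone : tex[k]? = none := by
      rw [List.getElem?_eq_none]
      exact List.drop_eq_nil_iff.mp hdrop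
    rw [pvLoopA_none a b c d tex _ j k parts hnone]
    simp [pvSplice, PySem.List.slice_from_natCast]
  | cons p ps ih =>
    intro k j parts hdrop hch hj
    obtain ⟨o, cl⟩ := p
    obtain ⟨hjo, hoc, hcl, hch'⟩ := hch
    have ho : o < full.length := by omega
    have htk : tex[k]? = some (o, cl) := by
      have h0 : (tex.drop k)[0]? = tex[k+0]? := List.getElem?_drop
      rw [hdrop] at h0; simpa using h0.symm
    have hdrop' : tex.drop (k+1) = ps := by
      rw [← List.drop_drop, hdrop]; rfl
    -- decompose full.drop j up to the open position
    have e1 : full.drop j = (full.drop j).take (o - j) ++ full.drop o := by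
      conv_lhs => rw [← List.take_append_drop (o - j) (full.drop j)]
      rw [List.drop_drop]
      congr 2
      omega
    have hsl1 : ((full.drop j).take (o - j)).length = o - j := by
      simp [List.length_take, List.length_drop]; omega
    have e2 : full.drop o = full[o] :: full.drop (o+1) := List.drop_eq_getElem_cons ho
    have e3 : full.drop cl = full[cl] :: full.drop (cl+1) := List.drop_eq_getElem_cons hcl
    have e4 : full.drop (o+1) = (full.drop (o+1)).take (cl - (o+1)) ++ full.drop cl := by
      conv_lhs => rw [← List.take_append_drop (cl - (o+1)) (full.drop (o+1))]
      rw [List.drop_drop]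
      congr 2
      omega
    have hsl2 : ((full.drop (o+1)).take (cl - (o+1))).length = cl - (o+1) := by
      simp [List.length_take, List.length_drop]; omega
    -- LHS: copy up to o
    rw [e1, pvLoopA_copy a b c d tex _ _ j k parts (by
      intro p hp m hm
      rw [htk] at hp
      cases hp
      rw [hsl1] at hm
      constructor <;> (simp only []; omega))]
    rw [hsl1, show j + (o - j) = o by omega, e2]
    -- step at the open position
    simp only [pvLoopA, htk]
    rw [show (o == o || o == cl) = true by simp, show (o == o) = true by simp]
    simp only [if_true]
    -- copy the inside up to cl
    rw [e4]
    rw [pvLoopA_copy a b c d tex _ _ (o+1) k _ (by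
      intro p hp m hm
      rw [htk] at hp
      cases hp
      rw [hsl2] at hm
      constructor <;> (simp only []; omega))]
    rw [hsl2, show o + 1 + (cl - (o+1)) = cl by omega, e3]
    -- step at the close position
    simp only [pvLoopA, htk]
    rw [show (cl == o || cl == cl) = true by simp, show (cl == o) = false by simp; omega]
    simp only [Bool.false_eq_true, if_false, if_true]
    -- recurse
    rw [ih (k+1) (cl+1) _ hdrop' hch' (by omega)]
    -- RHS
    simp only [pvSplice]
    congr 1
    have c1 : PySem.List.slice full (some (j : Int)) (some (o : Int)) = (full.drop j).take (o - j) :=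
      PySem.List.slice_natCast full j o
    have c2 : PySem.List.slice full (some (o : Int)) (some ((o : Int) + 1)) = [full[o]] := by
      rw [show (o : Int) + 1 = ((o + 1 : Nat) : Int) by push_cast; ring]
      rw [PySem.List.slice_natCast full o (o+1), show o+1-o = 1 by omega, e2]
      rfl
    have c3 : PySem.List.slice full (some ((o : Int) + 1)) (some (cl : Int))
        = (full.drop (o+1)).take (cl - (o+1)) := by
      rw [show (o : Int) + 1 = ((o + 1 : Nat) : Int) by push_cast; ring]
      exact PySem.List.slice_natCast full (o+1) cl
    have c4 : PySem.List.slice full (some (cl : Int)) (some ((cl : Int) + 1)) = [full[cl]] := by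
      rw [show (cl : Int) + 1 = ((cl + 1 : Nat) : Int) by push_cast; ring]
      rw [PySem.List.slice_natCast full cl (cl+1), show cl+1-cl = 1 by omega, e3]
      rfl
    rw [c1, c2, c3, c4]

-- ===== VERDICT (by name: the statement is the Claim_ definition above) =====
theorem apply_tag_between_inside_spec : Claim_equal_apply_tag_between_inside := by
  intro s symbols_char tags ignore_escape _ _
  show apply_tag_between_inside s symbols_char tags ignore_escape
      = apply_tag_between_inside_alt s symbols_char tags ignore_escape
  unfold apply_tag_between_inside apply_tag_between_inside_alt
  simp only []
  split_ifs with h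
  · rfl
  · congr 1
    have := pvLoopA_eq_pvSplice tags.1.toList tags.2.1.toList tags.2.2.1.toList tags.2.2.2.toList
      s.toList (find_tex_command_char s symbols_char ignore_escape)
      (find_tex_command_char s symbols_char ignore_escape) 0 0 []
      (by simp) (find_chain s symbols_char ignore_escape) (by omega)
    simpa using this
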